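-- pv_equiv track=rewrite | github.com/itslokeshx/AlignIQ | backend/modules/profile_processor.py | calculate_personality_scores
-- ===== SOURCE A (Python) =====
-- def calculate_personality_scores(answers: dict) -> dict:
--     """
--     Map 8 answers to 5 personality dimension scores (0–100).
--     0 = left side of spectrum, 100 = right side.
--     """
--     s = {
--         'analytical_creative':    50,
--         'independent_collaborative': 50,
--         'theoretical_practical':  50,
--         'stable_adaptive':        50,
--         'specialist_generalist':  50,
--     }
--     if answers.get('q1') == 'B': s['analytical_creative']    += 25
--     else:                         s['analytical_creative']    -= 25
--     if answers.get('q2') == 'B': s['independent_collaborative'] += 25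
--     else:                         s['independent_collaborative'] -= 25
--     if answers.get('q3') == 'B': s['theoretical_practical']  += 25
--     else:                         s['theoretical_practical']  -= 25
--     if answers.get('q4') == 'B': s['stable_adaptive']        += 25
--     else:                         s['stable_adaptive']        -= 25
--     if answers.get('q5') == 'B': s['stable_adaptive']        += 12
--     else:                         s['stable_adaptive']        -= 12
--     if answers.get('q6') == 'B': s['analytical_creative']    += 12
--     else:                         s['analytical_creative']    -= 12
--     if answers.get('q7') == 'A': s['theoretical_practical']  += 12
--     else:                         s['theoretical_practical']  -= 12
--     if answers.get('q8') == 'B': s['specialist_generalist']  += 25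
--     else:                         s['specialist_generalist']  -= 25
--     return {k: max(0, min(100, v)) for k, v in s.items()}
-- ===== SOURCE B (Python) =====
-- # Closed-form version: each dimension's final score is looked up directly from
-- # the (at most two) relevant answer booleans; no running totals, no clamping
-- # (all reachable values 13..87 lie strictly inside [0,100]).
--
-- _PAIR = {(False, False): 13, (False, True): 37, (True, False): 63, (True, True): 87}
-- _SINGLE = {False: 25, True: 75}
--
-- def calculate_personality_scores(answers: dict) -> dict:
--     return {
--         'analytical_creative':
--             _PAIR[(answers.get('q1') == 'B', answers.get('q6') == 'B')],
--         'independent_collaborative':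
--             _SINGLE[answers.get('q2') == 'B'],
--         'theoretical_practical':
--             _PAIR[(answers.get('q3') == 'B', answers.get('q7') == 'A')],
--         'stable_adaptive':
--             _PAIR[(answers.get('q4') == 'B', answers.get('q5') == 'B')],
--         'specialist_generalist':
--             _SINGLE[answers.get('q8') == 'B'],
--     }
-- ===== Notes on version B (the rewrite author's own statement) =====
-- stated objective: simpler
-- what changed: Replaces A's mutable accumulator with eight conditional +/-delta updates and a final clamping pass by a direct closed-form construction: each dimension's final score is looked up from its (at most two) answer booleans in a precomputed value table, with no accumulation and no clamping (all reachable values lie in 13..87).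
import Mathlib
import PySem

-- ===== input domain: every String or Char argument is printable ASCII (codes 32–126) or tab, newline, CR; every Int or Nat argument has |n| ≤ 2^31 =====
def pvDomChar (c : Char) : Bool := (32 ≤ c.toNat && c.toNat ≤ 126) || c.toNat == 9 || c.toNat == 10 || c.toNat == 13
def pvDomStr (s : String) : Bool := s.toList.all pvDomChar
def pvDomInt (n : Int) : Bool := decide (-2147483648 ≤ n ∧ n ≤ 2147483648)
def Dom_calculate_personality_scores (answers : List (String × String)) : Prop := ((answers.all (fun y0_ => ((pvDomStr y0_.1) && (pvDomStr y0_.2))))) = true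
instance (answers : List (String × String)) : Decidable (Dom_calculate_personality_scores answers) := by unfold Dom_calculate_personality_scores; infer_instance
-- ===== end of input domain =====

-- B replaces A's mutable accumulator (eight conditional ±delta updates plus a clamping pass)
-- by a direct closed-form construction looking up each dimension's final score in a value table (objective: simpler).

-- ===== PORT A =====
def calculate_personality_scores (answers : List (String × String)) : List (String × Int) :=
  let a := PySem.Dict.mk answers
  let s : PySem.Dict String Int :=
    ((((PySem.Dict.empty.insert "analytical_creative" 50).insert
        "independent_collaborative" 50).insert
        "theoretical_practical" 50).insert
        "stable_adaptive" 50).insert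
        "specialist_generalist" 50
  let s := if a.get? "q1" == some "B" then s.modify "analytical_creative" 0 (· + 25)
           else s.modify "analytical_creative" 0 (· - 25)
  let s := if a.get? "q2" == some "B" then s.modify "independent_collaborative" 0 (· + 25)
           else s.modify "independent_collaborative" 0 (· - 25)
  let s := if a.get? "q3" == some "B" then s.modify "theoretical_practical" 0 (· + 25)
           else s.modify "theoretical_practical" 0 (· - 25)
  let s := if a.get? "q4" == some "B" then s.modify "stable_adaptive" 0 (· + 25)
           else s.modify "stable_adaptive" 0 (· - 25)
  let s := if a.get? "q5" == some "B" then s.modify "stable_adaptive" 0 (· + 12)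
           else s.modify "stable_adaptive" 0 (· - 12)
  let s := if a.get? "q6" == some "B" then s.modify "analytical_creative" 0 (· + 12)
           else s.modify "analytical_creative" 0 (· - 12)
  let s := if a.get? "q7" == some "A" then s.modify "theoretical_practical" 0 (· + 12)
           else s.modify "theoretical_practical" 0 (· - 12)
  let s := if a.get? "q8" == some "B" then s.modify "specialist_generalist" 0 (· + 25)
           else s.modify "specialist_generalist" 0 (· - 25)
  s.items.map (fun kv => (kv.1, max 0 (min 100 kv.2)))

-- ===== PORT B =====
-- _PAIR: final score for a dimension driven by two answer booleans
def pvPair (p : Bool × Bool) : Int :=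
  match p with
  | (false, false) => 13
  | (false, true)  => 37
  | (true, false)  => 63
  | (true, true)   => 87

-- _SINGLE: final score for a dimension driven by one answer boolean
def pvSingle (b : Bool) : Int := if b then 75 else 25

def calculate_personality_scores_alt (answers : List (String × String)) : List (String × Int) :=
  let a := PySem.Dict.mk answers
  [("analytical_creative",
      pvPair (a.get? "q1" == some "B", a.get? "q6" == some "B")),
   ("independent_collaborative",
      pvSingle (a.get? "q2" == some "B")),
   ("theoretical_practical",
      pvPair (a.get? "q3" == some "B", a.get? "q7" == some "A")),
   ("stable_adaptive",
      pvPair (a.get? "q4" == some "B", a.get? "q5" == some "B")),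
   ("specialist_generalist",
      pvSingle (a.get? "q8" == some "B"))]

-- ===== PRECONDITION & SPEC =====
def Spec_calculate_personality_scores (answers : List (String × String)) (out : List (String × Int)) : Prop := out = calculate_personality_scores_alt answers
instance (answers : List (String × String)) (out : List (String × Int)) : Decidable (Spec_calculate_personality_scores answers out) := by unfold Spec_calculate_personality_scores; infer_instance

-- ===== CLAIM (what is proved, stated in full; the proofs are below) =====
def Claim_equal_calculate_personality_scores : Prop := ∀ (answers : List (String × String)), Dom_calculate_personality_scores answers → Spec_calculate_personality_scores answers (calculate_personality_scores answers)

-- ===== LEMMAS AND PROOFS =====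

-- Both programs depend on the input only through the eight Boolean trigger tests; after
-- generalizing those, the equality of the two closed computations is decided by the kernel.
theorem pv_bool_core (b1 b2 b3 b4 b5 b6 b7 b8 : Bool) :
    (let s : PySem.Dict String Int :=
      ((((PySem.Dict.empty.insert "analytical_creative" 50).insert
          "independent_collaborative" 50).insert
          "theoretical_practical" 50).insert
          "stable_adaptive" 50).insert
          "specialist_generalist" 50
     let s := if b1 then s.modify "analytical_creative" 0 (· + 25) else s.modify "analytical_creative" 0 (· - 25)
     let s := if b2 then s.modify "independent_collaborative" 0 (· + 25) else s.modify "independent_collaborative" 0 (· - 25)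
     let s := if b3 then s.modify "theoretical_practical" 0 (· + 25) else s.modify "theoretical_practical" 0 (· - 25)
     let s := if b4 then s.modify "stable_adaptive" 0 (· + 25) else s.modify "stable_adaptive" 0 (· - 25)
     let s := if b5 then s.modify "stable_adaptive" 0 (· + 12) else s.modify "stable_adaptive" 0 (· - 12)
     let s := if b6 then s.modify "analytical_creative" 0 (· + 12) else s.modify "analytical_creative" 0 (· - 12)
     let s := if b7 then s.modify "theoretical_practical" 0 (· + 12) else s.modify "theoretical_practical" 0 (· - 12)
     let s := if b8 then s.modify "specialist_generalist" 0 (· + 25) else s.modify "specialist_generalist" 0 (· - 25)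
     s.items.map (fun kv => (kv.1, max 0 (min 100 kv.2))))
    =
    [("analytical_creative", pvPair (b1, b6)),
     ("independent_collaborative", pvSingle b2),
     ("theoretical_practical", pvPair (b3, b7)),
     ("stable_adaptive", pvPair (b4, b5)),
     ("specialist_generalist", pvSingle b8)] := by
  cases b1 <;> cases b2 <;> cases b3 <;> cases b4 <;> cases b5 <;> cases b6 <;> cases b7 <;> cases b8 <;> decide

-- ===== VERDICT (by name: the statement is the Claim_ definition above) =====
theorem calculate_personality_scores_spec : Claim_equal_calculate_personality_scores := by
  intro answers _
  show calculate_personality_scores answers = calculate_personality_scores_alt answers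
  unfold calculate_personality_scores calculate_personality_scores_alt
  exact pv_bool_core _ _ _ _ _ _ _ _
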